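-- pv_equiv track=rewrite | github.com/WuizaKaseiyo/PRISM | prism/utils.py | _find_json_objects
-- ===== SOURCE A (Python) =====
-- def _find_json_objects(text: str) -> list[str]:
--     """Find JSON objects in text using balanced brace counting.
--
--     Handles quoted strings to avoid counting braces inside them.
--     """
--     objects: list[str] = []
--     i = 0
--     while i < len(text):
--         if text[i] == "{":
--             depth = 1
--             start = i
--             i += 1
--             while i < len(text) and depth > 0:
--                 if text[i] == "{":
--                     depth += 1
--                 elif text[i] == "}":
--                     depth -= 1
--                 elif text[i] == '"':
--                     i += 1
--                     while i < len(text) and text[i] != '"':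
--                         if text[i] == "\\":
--                             i += 1
--                         i += 1
--                 i += 1
--             if depth == 0:
--                 objects.append(text[start:i])
--         else:
--             i += 1
--     return objects
-- ===== SOURCE B (Python) =====
-- def _find_json_objects(text: str) -> list[str]:
--     """Find JSON objects in text with one flat state-machine pass.
--
--     Single loop over the characters, keeping depth / start / in-string /
--     escape state instead of nested index-advancing loops.
--     """
--     objects: list[str] = []
--     depth = 0
--     start = 0
--     in_string = False
--     escape = False
--     for i, ch in enumerate(text):
--         if escape:
--             escape = False
--         elif in_string:
--             if ch == "\\":
--                 escape = True
--             elif ch == '"':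
--                 in_string = False
--         elif depth > 0:
--             if ch == '"':
--                 in_string = True
--             elif ch == "{":
--                 depth += 1
--             elif ch == "}":
--                 depth -= 1
--                 if depth == 0:
--                     objects.append(text[start:i + 1])
--         else:
--             if ch == "{":
--                 depth = 1
--                 start = i
--     return objects
-- ===== Notes on version B (the rewrite author's own statement) =====
-- stated objective: faster
-- what changed: A's nested index-advancing loops (outer scan, per-object brace loop, inner quoted-string skip loop) are replaced by a single flat enumerate pass maintaining depth/start/in-string/escape state variables.
import Mathlib
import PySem

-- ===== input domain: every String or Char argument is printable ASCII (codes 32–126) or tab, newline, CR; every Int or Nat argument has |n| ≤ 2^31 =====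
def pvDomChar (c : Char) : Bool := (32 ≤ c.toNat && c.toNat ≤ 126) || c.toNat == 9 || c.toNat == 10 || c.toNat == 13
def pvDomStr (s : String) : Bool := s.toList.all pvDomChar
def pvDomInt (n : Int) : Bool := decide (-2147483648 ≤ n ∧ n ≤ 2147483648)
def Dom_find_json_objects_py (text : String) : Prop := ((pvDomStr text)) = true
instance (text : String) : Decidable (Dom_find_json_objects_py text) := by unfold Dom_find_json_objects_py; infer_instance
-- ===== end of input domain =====

-- B replaces A's nested index-advancing loops by one flat fold over the characters
-- carrying depth / start / in-string / escape state (same O(n); measured constant-factor faster).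


-- ===== PORT A =====
-- A's loops advance an index i bounded by the text length; each is ported with a structural
-- fuel argument (fuel ≥ remaining length, a pure totality guard: with adequate fuel the
-- branch structure is exactly A's loop body).
-- A's innermost loop: `while i < len(text) and text[i] != '"': if text[i] == "\\": i += 1; i += 1`
-- (returns the index where that loop stops).
def strSkip (cs : List Char) : Nat → Nat → Nat
  | 0, i => i
  | fuel + 1, i =>
    if h : i < cs.length then
      if cs[i] = '"' then i
      else if cs[i] = '\\' then strSkip cs fuel (i + 2)
      else strSkip cs fuel (i + 1)
    else i

-- A's middle loop: `while i < len(text) and depth > 0: …` — returns (final i, final depth).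
def objScan (cs : List Char) : Nat → Nat → Int → Nat × Int
  | 0, i, depth => (i, depth)
  | fuel + 1, i, depth =>
    if h : i < cs.length ∧ 0 < depth then
      if cs[i]'h.1 = '{' then objScan cs fuel (i + 1) (depth + 1)
      else if cs[i]'h.1 = '}' then objScan cs fuel (i + 1) (depth - 1)
      else if cs[i]'h.1 = '"' then objScan cs fuel (strSkip cs fuel (i + 1) + 1) depth
      else objScan cs fuel (i + 1) depth
    else (i, depth)

-- A's outer loop over i; text[start:i] ported as the exact (in-range) slice drop/take.
def outerScan (cs : List Char) : Nat → Nat → List String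
  | 0, _ => []
  | fuel + 1, i =>
    if h : i < cs.length then
      if cs[i] = '{' then
        let r := objScan cs fuel (i + 1) 1
        if r.2 = 0 then String.ofList ((cs.drop i).take (r.1 - i)) :: outerScan cs fuel r.1
        else outerScan cs fuel r.1
      else outerScan cs fuel (i + 1)
    else []

def find_json_objects_py (text : String) : List String :=
  outerScan text.toList text.toList.length 0

-- ===== PORT B =====
structure BState where
  objs : List String
  depth : Int
  start : Int
  inStr : Bool
  esc : Bool
deriving Repr, DecidableEq

-- one iteration of B's `for i, ch in enumerate(text)` body; text[start:i+1] is PySem.List.slice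
def bstep (cs : List Char) (s : BState) (p : Int × Char) : BState :=
  if s.esc then { s with esc := false }
  else if s.inStr then
    if p.2 = '\\' then { s with esc := true }
    else if p.2 = '"' then { s with inStr := false }
    else s
  else if 0 < s.depth then
    if p.2 = '"' then { s with inStr := true }
    else if p.2 = '{' then { s with depth := s.depth + 1 }
    else if p.2 = '}' then
      if s.depth - 1 = 0 then
        { s with depth := 0,
                 objs := s.objs ++ [String.ofList (PySem.List.slice cs (some s.start) (some (p.1 + 1)))] }
      else { s with depth := s.depth - 1 }
    else s
  else if p.2 = '{' then { s with depth := 1, start := p.1 }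
  else s

def find_json_objects_py_alt (text : String) : List String :=
  ((PySem.List.enumerate text.toList 0).foldl (bstep text.toList)
      ⟨[], 0, 0, false, false⟩).objs

-- ===== PRECONDITION & SPEC =====
def Spec_find_json_objects_py (text : String) (out : List String) : Prop := out = find_json_objects_py_alt text
instance (text : String) (out : List String) : Decidable (Spec_find_json_objects_py text out) := by unfold Spec_find_json_objects_py; infer_instance

-- ===== CLAIM (what is proved, stated in full; the proofs are below) =====
def Claim_equal_find_json_objects_py : Prop := ∀ (text : String), Dom_find_json_objects_py text → Spec_find_json_objects_py text (find_json_objects_py text)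

-- ===== LEMMAS AND PROOFS =====

theorem le_strSkip (cs : List Char) : ∀ (f i : Nat), i ≤ strSkip cs f i := by
  intro f
  induction f with
  | zero => intro i; simp [strSkip]
  | succ f ih =>
    intro i
    by_cases hi : i < cs.length
    · by_cases hq : cs[i] = '"'
      · simp [strSkip, hi, hq]
      · by_cases hb : cs[i] = '\\'
        · have := ih (i + 2); simp [strSkip, hi, hb]; omega
        · have := ih (i + 1); simp [strSkip, hi, hq, hb]; omega
    · simp [strSkip, hi]

theorem le_objScan (cs : List Char) : ∀ (f i : Nat) (d : Int), i ≤ (objScan cs f i d).1 := by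
  intro f
  induction f with
  | zero => intro i d; simp [objScan]
  | succ f ih =>
    intro i d
    by_cases h : i < cs.length ∧ 0 < d
    · by_cases ho : cs[i]'h.1 = '{'
      · have := ih (i + 1) (d + 1); simp [objScan, h, ho]; omega
      · by_cases hcl : cs[i]'h.1 = '}'
        · have := ih (i + 1) (d - 1); simp [objScan, h, hcl]; omega
        · by_cases hqt : cs[i]'h.1 = '"'
          · have h1 := ih (strSkip cs f (i + 1) + 1) d
            have h2 := le_strSkip cs f (i + 1)
            simp [objScan, h, hqt]; omega
          · have := ih (i + 1) d; simp [objScan, h, ho, hcl, hqt]; omega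
    · simp [objScan, h]

theorem objScan_stuck (cs : List Char) : ∀ (f i : Nat) (d : Int), cs.length - i ≤ f → 0 ≤ d →
    (objScan cs f i d).2 ≠ 0 → cs.length ≤ (objScan cs f i d).1 := by
  intro f
  induction f with
  | zero => intro i d hf _ _; simp [objScan]; omega
  | succ f ih =>
    intro i d hf hd hnz
    by_cases h : i < cs.length ∧ 0 < d
    · by_cases ho : cs[i]'h.1 = '{'
      · rw [objScan] at hnz ⊢; simp [h, ho] at hnz ⊢
        exact ih (i + 1) (d + 1) (by omega) (by omega) hnz
      · by_cases hcl : cs[i]'h.1 = '}'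
        · rw [objScan] at hnz ⊢; simp [h, hcl] at hnz ⊢
          exact ih (i + 1) (d - 1) (by omega) (by omega) hnz
        · by_cases hqt : cs[i]'h.1 = '"'
          · rw [objScan] at hnz ⊢; simp [h, hqt] at hnz ⊢
            have h2 := le_strSkip cs f (i + 1)
            exact ih (strSkip cs f (i + 1) + 1) d (by omega) hd hnz
          · rw [objScan] at hnz ⊢; simp [h, ho, hcl, hqt] at hnz ⊢
            exact ih (i + 1) d (by omega) hd hnz
    · rw [objScan] at hnz ⊢; simp [h] at hnz ⊢; omega

-- L1: the in-string state consumed from index i equals resuming after A's strSkip.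
theorem L1 (cs : List Char) :
    ∀ (n i : Nat) (obs : List String) (d st : Int), cs.length - i ≤ n →
      ((PySem.List.enumerate (cs.drop i) (i : Int)).foldl (bstep cs) ⟨obs, d, st, true, false⟩).objs
      = ((PySem.List.enumerate (cs.drop (strSkip cs n i + 1)) ((strSkip cs n i + 1 : Nat) : Int)).foldl
          (bstep cs) ⟨obs, d, st, false, false⟩).objs := by
  intro n
  induction n with
  | zero =>
    intro i obs d st hn
    have hle : cs.length ≤ i := by omega
    rw [show strSkip cs 0 i = i from rfl, List.drop_eq_nil_of_le hle, List.drop_eq_nil_of_le (by omega)]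
    simp [PySem.List.enumerate_nil]
  | succ n ih =>
    intro i obs d st hn
    by_cases hi : i < cs.length
    · rw [List.drop_eq_getElem_cons hi, PySem.List.enumerate_cons, List.foldl_cons]
      have hc : ((i : Int) + 1) = ((i + 1 : Nat) : Int) := by push_cast; ring
      by_cases hq : cs[i] = '"'
      · have hs : strSkip cs (n + 1) i = i := by simp [strSkip, hi, hq]
        rw [hs]
        have e : bstep cs ⟨obs, d, st, true, false⟩ ((i : Int), cs[i]) = ⟨obs, d, st, false, false⟩ := by
          simp [bstep, hq]
        rw [e, hc]
      · by_cases hb : cs[i] = '\\'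
        · have hs : strSkip cs (n + 1) i = strSkip cs n (i + 2) := by simp [strSkip, hi, hb]
          rw [hs]
          have e : bstep cs ⟨obs, d, st, true, false⟩ ((i : Int), cs[i]) = ⟨obs, d, st, true, true⟩ := by
            simp [bstep, hb]
          rw [e, hc]
          by_cases hi1 : i + 1 < cs.length
          · rw [List.drop_eq_getElem_cons hi1, PySem.List.enumerate_cons, List.foldl_cons]
            have e2 : bstep cs ⟨obs, d, st, true, true⟩ (((i + 1 : Nat) : Int), cs[i + 1]) = ⟨obs, d, st, true, false⟩ := by
              simp [bstep]
            have hc2 : (((i + 1 : Nat) : Int) + 1) = ((i + 2 : Nat) : Int) := by push_cast; ring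
            rw [e2, hc2]
            exact ih (i + 2) obs d st (by omega)
          · have h1 : cs.length ≤ i + 1 := by omega
            have h2 := le_strSkip cs n (i + 2)
            rw [List.drop_eq_nil_of_le h1, List.drop_eq_nil_of_le (by omega)]
            simp [PySem.List.enumerate_nil]
        · have hs : strSkip cs (n + 1) i = strSkip cs n (i + 1) := by simp [strSkip, hi, hq, hb]
          rw [hs]
          have e : bstep cs ⟨obs, d, st, true, false⟩ ((i : Int), cs[i]) = ⟨obs, d, st, true, false⟩ := by
            simp [bstep, hq, hb]
          rw [e, hc]
          exact ih (i + 1) obs d st (by omega)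
    · have hle : cs.length ≤ i := by omega
      have hs : strSkip cs (n + 1) i = i := by simp [strSkip, hi]
      rw [hs, List.drop_eq_nil_of_le hle, List.drop_eq_nil_of_le (by omega)]
      simp [PySem.List.enumerate_nil]

-- L2: the inside-an-object state from index i equals A's objScan outcome.
theorem L2 (cs : List Char) :
    ∀ (n i : Nat) (obs : List String) (d : Int) (st : Nat), cs.length - i ≤ n → 0 < d →
      ((PySem.List.enumerate (cs.drop i) (i : Int)).foldl (bstep cs) ⟨obs, d, (st : Int), false, false⟩).objs
      = (if (objScan cs n i d).2 = 0 then
          ((PySem.List.enumerate (cs.drop (objScan cs n i d).1) ((objScan cs n i d).1 : Int)).foldl (bstep cs)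
            ⟨obs ++ [String.ofList ((cs.drop st).take ((objScan cs n i d).1 - st))], 0, (st : Int), false, false⟩).objs
        else obs) := by
  intro n
  induction n with
  | zero =>
    intro i obs d st hn hd
    have hle : cs.length ≤ i := by omega
    rw [show objScan cs 0 i d = (i, d) from rfl, List.drop_eq_nil_of_le hle]
    simp [PySem.List.enumerate_nil, show d ≠ 0 from by omega]
  | succ n ih =>
    intro i obs d st hn hd
    by_cases hi : i < cs.length
    · rw [List.drop_eq_getElem_cons hi, PySem.List.enumerate_cons, List.foldl_cons]
      have hc : ((i : Int) + 1) = ((i + 1 : Nat) : Int) := by push_cast; ring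
      by_cases ho : cs[i] = '{'
      · have hsc : objScan cs (n + 1) i d = objScan cs n (i + 1) (d + 1) := by
          simp [objScan, hi, hd, ho]
        have e : bstep cs ⟨obs, d, (st : Int), false, false⟩ ((i : Int), cs[i]) = ⟨obs, d + 1, (st : Int), false, false⟩ := by
          simp [bstep, hd, ho]
        rw [e, hc, hsc]
        exact ih (i + 1) obs (d + 1) st (by omega) (by omega)
      · by_cases hcl : cs[i] = '}'
        · by_cases hd1 : d - 1 = 0
          · have hsc : objScan cs (n + 1) i d = (i + 1, 0) := by
              simp [objScan, hi, hd, hcl]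
              rw [hd1]
              cases n <;> simp [objScan]
            have e : bstep cs ⟨obs, d, (st : Int), false, false⟩ ((i : Int), cs[i]) =
                ⟨obs ++ [String.ofList (PySem.List.slice cs (some (st : Int)) (some ((i : Int) + 1)))], 0, (st : Int), false, false⟩ := by
              simp [bstep, hd, hcl, hd1]
            rw [e, hc, hsc, PySem.List.slice_natCast]
            simp
          · have hsc : objScan cs (n + 1) i d = objScan cs n (i + 1) (d - 1) := by
              simp [objScan, hi, hd, hcl]
            have e : bstep cs ⟨obs, d, (st : Int), false, false⟩ ((i : Int), cs[i]) = ⟨obs, d - 1, (st : Int), false, false⟩ := by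
              simp [bstep, hd, hcl, hd1]
            rw [e, hc, hsc]
            exact ih (i + 1) obs (d - 1) st (by omega) (by omega)
        · by_cases hqt : cs[i] = '"'
          · have hsc : objScan cs (n + 1) i d = objScan cs n (strSkip cs n (i + 1) + 1) d := by
              simp [objScan, hi, hd, hqt]
            have e : bstep cs ⟨obs, d, (st : Int), false, false⟩ ((i : Int), cs[i]) = ⟨obs, d, (st : Int), true, false⟩ := by
              simp [bstep, hd, hqt]
            rw [e, hc, hsc]
            rw [L1 cs n (i + 1) obs d st (by omega)]
            have hss := le_strSkip cs n (i + 1)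
            exact ih (strSkip cs n (i + 1) + 1) obs d st (by omega) hd
          · have hsc : objScan cs (n + 1) i d = objScan cs n (i + 1) d := by
              simp [objScan, hi, hd, ho, hcl, hqt]
            have e : bstep cs ⟨obs, d, (st : Int), false, false⟩ ((i : Int), cs[i]) = ⟨obs, d, (st : Int), false, false⟩ := by
              simp [bstep, hd, ho, hcl, hqt]
            rw [e, hc, hsc]
            exact ih (i + 1) obs d st (by omega) hd
    · have hle : cs.length ≤ i := by omega
      have hsc : objScan cs (n + 1) i d = (i, d) := by
        simp [objScan, show ¬ (i < cs.length ∧ 0 < d) from by tauto]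
      rw [hsc, List.drop_eq_nil_of_le hle]
      simp [PySem.List.enumerate_nil, show d ≠ 0 from by omega]

-- L3: the top-level state from index i produces A's outer loop output.
theorem L3 (cs : List Char) :
    ∀ (n i : Nat) (obs : List String) (st : Int), cs.length - i ≤ n →
      ((PySem.List.enumerate (cs.drop i) (i : Int)).foldl (bstep cs) ⟨obs, 0, st, false, false⟩).objs
      = obs ++ outerScan cs n i := by
  intro n
  induction n with
  | zero =>
    intro i obs st hn
    have hle : cs.length ≤ i := by omega
    rw [List.drop_eq_nil_of_le hle]
    simp [PySem.List.enumerate_nil, outerScan]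
  | succ n ih =>
    intro i obs st hn
    by_cases hi : i < cs.length
    · rw [List.drop_eq_getElem_cons hi, PySem.List.enumerate_cons, List.foldl_cons]
      have hc : ((i : Int) + 1) = ((i + 1 : Nat) : Int) := by push_cast; ring
      by_cases ho : cs[i] = '{'
      · have e : bstep cs ⟨obs, 0, st, false, false⟩ ((i : Int), cs[i]) = ⟨obs, 1, (i : Int), false, false⟩ := by
          simp [bstep, ho]
        rw [e, hc, L2 cs n (i + 1) obs 1 i (by omega) (by norm_num), outerScan]
        simp only [hi, dif_pos, ho, if_pos]
        by_cases hz : (objScan cs n (i + 1) 1).2 = 0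
        · rw [if_pos hz, if_pos hz]
          have h1 := le_objScan cs n (i + 1) 1
          rw [ih (objScan cs n (i + 1) 1).1 _ (i : Int) (by omega)]
          simp
        · rw [if_neg hz, if_neg hz]
          have hst := objScan_stuck cs n (i + 1) 1 (by omega) (by norm_num) hz
          have hout : outerScan cs n (objScan cs n (i + 1) 1).1 = [] := by
            cases n <;> simp [outerScan, Nat.not_lt.mpr hst]
          rw [hout]; simp
      · have e : bstep cs ⟨obs, 0, st, false, false⟩ ((i : Int), cs[i]) = ⟨obs, 0, st, false, false⟩ := by
          simp [bstep, ho]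
        rw [e, hc]
        rw [show outerScan cs (n + 1) i = outerScan cs n (i + 1) from by simp [outerScan, hi, ho]]
        exact ih (i + 1) obs st (by omega)
    · rw [List.drop_eq_nil_of_le (by omega)]
      simp [PySem.List.enumerate_nil, outerScan, hi]

-- ===== VERDICT (by name: the statement is the Claim_ definition above) =====
theorem find_json_objects_py_spec : Claim_equal_find_json_objects_py := by
  intro text _
  unfold Spec_find_json_objects_py find_json_objects_py find_json_objects_py_alt
  have := L3 text.toList text.toList.length 0 [] 0 (by omega)
  simpa using this.symm
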